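-- pv_equiv track=rewrite | github.com/Lichers0/dotfiles2 | ai/src/aiwr/models.py | merge_extra_args
-- ===== SOURCE A (Python) =====
-- def merge_extra_args(model_args: list[str], cli_args: list[str]) -> list[str]:
--     """Merge model extra_args with CLI extra_args.
--
--     CLI args override model args for the same flags.
--
--     Args:
--         model_args: Extra args from model config
--         cli_args: Extra args from command line
--
--     Returns:
--         Merged list of args with CLI priority
--     """
--     if not model_args:
--         return cli_args
--     if not cli_args:
--         return model_args
--
--     # Parse CLI args to find which flags are overridden
--     cli_flags = set()
--     i = 0
--     while i < len(cli_args):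
--         arg = cli_args[i]
--         if arg.startswith("-"):
--             cli_flags.add(arg)
--         i += 1
--
--     # Filter model args - skip flags that are in CLI
--     result = []
--     i = 0
--     while i < len(model_args):
--         arg = model_args[i]
--         if arg.startswith("-"):
--             if arg in cli_flags:
--                 # Skip this flag and its value
--                 i += 1
--                 if i < len(model_args) and not model_args[i].startswith("-"):
--                     i += 1
--                 continue
--         result.append(arg)
--         i += 1
--
--     # Append all CLI args
--     result.extend(cli_args)
--     return result
-- ===== SOURCE B (Python) =====
-- def merge_extra_args(model_args: list[str], cli_args: list[str]) -> list[str]: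
--     """Merge model extra_args with CLI extra_args; CLI flags override model flags."""
--     if not model_args:
--         return cli_args
--     if not cli_args:
--         return model_args
--
--     cli_flags = {arg for arg in cli_args if arg.startswith("-")}
--
--     # Group model_args into segments: a flag plus its value (the following
--     # token, only when it does not start with '-'); anything else stands alone.
--     segments = []
--     it = iter(model_args)
--     pending = next(it, None)
--     while pending is not None:
--         tok = pending
--         pending = next(it, None)
--         if tok.startswith("-") and pending is not None and not pending.startswith("-"):
--             segments.append([tok, pending])
--             pending = next(it, None)
--         else:
--             segments.append([tok])
--
--     result = [t for seg in segments
--               if not (seg[0].startswith("-") and seg[0] in cli_flags)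
--               for t in seg]
--     result.extend(cli_args)
--     return result
-- ===== Notes on version B (the rewrite author's own statement) =====
-- stated objective: alternative
-- what changed: Replaces A's index-jumping while loop over model_args with a two-phase decomposition: one pass groups model_args into flag+value segments, then overridden segments are filtered out whole and the survivors flattened; the CLI flag set is built by a comprehension instead of an index loop.
import Mathlib
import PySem

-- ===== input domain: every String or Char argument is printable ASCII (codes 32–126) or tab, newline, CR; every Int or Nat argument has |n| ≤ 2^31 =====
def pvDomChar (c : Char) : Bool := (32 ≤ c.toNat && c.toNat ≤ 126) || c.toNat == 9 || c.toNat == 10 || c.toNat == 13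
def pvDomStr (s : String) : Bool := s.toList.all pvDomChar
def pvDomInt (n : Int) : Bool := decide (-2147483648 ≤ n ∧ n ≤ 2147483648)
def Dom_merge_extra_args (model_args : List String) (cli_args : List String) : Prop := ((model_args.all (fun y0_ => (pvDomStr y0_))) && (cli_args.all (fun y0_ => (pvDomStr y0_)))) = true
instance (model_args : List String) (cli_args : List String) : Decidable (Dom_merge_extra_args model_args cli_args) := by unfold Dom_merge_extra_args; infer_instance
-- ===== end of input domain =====

-- B merges by grouping model_args into flag+value segments once and filtering whole
-- segments against the CLI flag set (alternative decomposition, same cost).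

-- ===== PORT A =====
-- first while loop of A: collect the '-'-prefixed cli args into a set
def pvFlagsA (cli_args : List String) : PySem.Set String :=
  cli_args.foldl
    (fun s arg => if PySem.Str.startswith arg "-" then PySem.Set.add s arg else s)
    PySem.Set.empty

-- second while loop of A: index walk with the 'skip flag and its value' jump
def pvLoopA (flags : PySem.Set String) : List String → List String
  | [] => []
  | arg :: rest =>
    if PySem.Str.startswith arg "-" then
      if PySem.Set.contains flags arg then
        match rest with
        | [] => []
        | b :: rest' =>
          if PySem.Str.startswith b "-" then pvLoopA flags (b :: rest')
          else pvLoopA flags rest'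
      else arg :: pvLoopA flags rest
    else arg :: pvLoopA flags rest

def merge_extra_args (model_args : List String) (cli_args : List String) : List String :=
  if model_args = [] then cli_args
  else if cli_args = [] then model_args
  else pvLoopA (pvFlagsA cli_args) model_args ++ cli_args

-- ===== PORT B =====
-- B's segmentation pass: a flag token absorbs the next token if it is not '-'-prefixed
def pvSegsB : List String → List (List String)
  | [] => []
  | tok :: rest =>
    if PySem.Str.startswith tok "-" then
      match rest with
      | [] => [[tok]]
      | b :: rest' =>
        if PySem.Str.startswith b "-" then [tok] :: pvSegsB (b :: rest')
        else [tok, b] :: pvSegsB rest'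
    else [tok] :: pvSegsB rest

def merge_extra_args_alt (model_args : List String) (cli_args : List String) : List String :=
  if model_args = [] then cli_args
  else if cli_args = [] then model_args
  else
    let cli_flags :=
      PySem.Set.ofList (cli_args.filter (fun arg => PySem.Str.startswith arg "-"))
    (((pvSegsB model_args).filter
        (fun seg => !(PySem.Str.startswith (seg.headD "") "-" &&
                      PySem.Set.contains cli_flags (seg.headD "")))).flatten)
      ++ cli_args

-- ===== PRECONDITION & SPEC =====
def Spec_merge_extra_args (model_args : List String) (cli_args : List String) (out : List String) : Prop := out = merge_extra_args_alt model_args cli_args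
instance (model_args : List String) (cli_args : List String) (out : List String) : Decidable (Spec_merge_extra_args model_args cli_args out) := by unfold Spec_merge_extra_args; infer_instance

-- ===== CLAIM (what is proved, stated in full; the proofs are below) =====
def Claim_equal_merge_extra_args : Prop := ∀ (model_args : List String) (cli_args : List String), Dom_merge_extra_args model_args cli_args → Spec_merge_extra_args model_args cli_args (merge_extra_args model_args cli_args)

-- ===== LEMMAS AND PROOFS =====

-- A's conditional fold equals B's fold over the filtered list (same adds in the same order)
theorem pvFlags_eq_aux (c : List String) (s : PySem.Set String) :
    c.foldl (fun s arg => if PySem.Str.startswith arg "-" then PySem.Set.add s arg else s) s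
      = (c.filter (fun arg => PySem.Str.startswith arg "-")).foldl PySem.Set.add s := by
  induction c generalizing s with
  | nil => rfl
  | cons a c ih =>
    simp at ih
    by_cases h : PySem.Str.startswith a "-" = true <;> simp at h <;> simp [h, ih]

theorem pvFlags_eq (c : List String) :
    pvFlagsA c = PySem.Set.ofList (c.filter (fun arg => PySem.Str.startswith arg "-")) := by
  simpa [pvFlagsA, PySem.Set.ofList_eq_foldl, PySem.Set.empty] using
    pvFlags_eq_aux c PySem.Set.empty

-- unfolding steps of the two loops at a non-flag head (their tail is a free variable there)
theorem pvLoopA_cons_nonflag (flags : PySem.Set String) (b : String) (rest : List String)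
    (hb : PySem.Str.startswith b "-" = false) :
    pvLoopA flags (b :: rest) = b :: pvLoopA flags rest := by
  simp at hb
  cases rest <;> simp [pvLoopA, hb]

theorem pvSegsB_cons_nonflag (b : String) (rest : List String)
    (hb : PySem.Str.startswith b "-" = false) :
    pvSegsB (b :: rest) = [b] :: pvSegsB rest := by
  simp at hb
  cases rest <;> simp [pvSegsB, hb]

-- A's index walk equals B's filter-and-flatten over the segments
theorem pvLoop_eq_segs (flags : PySem.Set String) (xs : List String) :
    pvLoopA flags xs
      = ((pvSegsB xs).filter
          (fun seg => !(PySem.Str.startswith (seg.headD "") "-" &&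
                        PySem.Set.contains flags (seg.headD "")))).flatten := by
  induction xs using pvSegsB.induct with
  | case1 => rfl
  | case2 tok htok =>
    -- tok is a flag, rest = []
    simp at htok
    by_cases hm : tok ∈ flags <;> simp [pvLoopA, pvSegsB, htok, hm]
  | case3 tok htok b rest' hb ih =>
    -- tok flag, next token also a flag
    simp at htok hb ih
    by_cases hm : tok ∈ flags <;> simp [pvLoopA, pvSegsB, htok, hb, hm, ih]
  | case4 tok htok b rest' hb ih =>
    -- tok flag, next token is its value (A appends it on its next step when tok is kept)
    simp at htok hb ih
    by_cases hm : tok ∈ flags <;>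
      simp [pvLoopA, pvSegsB, pvLoopA_cons_nonflag, htok, hb, hm, ih]
  | case5 tok rest htok ih =>
    simp at htok ih
    simp [pvLoopA_cons_nonflag, pvSegsB_cons_nonflag, htok, ih]

-- ===== VERDICT (by name: the statement is the Claim_ definition above) =====
theorem merge_extra_args_spec : Claim_equal_merge_extra_args := by
  intro m c _
  unfold Spec_merge_extra_args merge_extra_args merge_extra_args_alt
  by_cases hm : m = []
  · simp [hm]
  · by_cases hc : c = []
    · simp [hm, hc]
    · simp only [hm, hc, if_false]
      rw [pvFlags_eq, pvLoop_eq_segs]
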